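-- pv_equiv track=rewrite | github.com/hoonseojung/cote | programmers/crop_n^2_array.py | solution
-- ===== SOURCE A (Python) =====
-- def solution(n, left, right):
--     answer = []
--     l = left // n
--     ld = left % n
--     r = right // n
--     rd = right % n
--     for i in range(l+1, r+2):
--         if l == r: # 한 줄에서만 가져오는 경우
--             for j in range(ld, rd+1):
--                 answer.append(max(j+1, i))
--         elif i == l+1: # 시작
--             for j in range(ld, n):
--                 answer.append(max(j+1, i))
--         elif i == r+1: # 마지막
--             for j in range(rd+1):
--                 answer.append(max(j+1, i))
--         else: # 중간
--             for j in range(n):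
--                 answer.append(max(j+1, i))
--     return answer
-- ===== SOURCE B (Python) =====
-- def solution(n, left, right):
--     return [max(k % n + 1, k // n + 1) for k in range(left, right + 1)]
-- ===== Notes on version B (the rewrite author's own statement) =====
-- stated objective: simpler
-- what changed: Replaces the nested row/column loops with a four-way positional branch by a single comprehension over the flat index k in [left, right], computing each value directly as max(k % n + 1, k // n + 1).
-- outside the precondition, e.g. on solution(-4, -6, -3): A returns [], B returns [2, 2, 2, 1]
import Mathlib
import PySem

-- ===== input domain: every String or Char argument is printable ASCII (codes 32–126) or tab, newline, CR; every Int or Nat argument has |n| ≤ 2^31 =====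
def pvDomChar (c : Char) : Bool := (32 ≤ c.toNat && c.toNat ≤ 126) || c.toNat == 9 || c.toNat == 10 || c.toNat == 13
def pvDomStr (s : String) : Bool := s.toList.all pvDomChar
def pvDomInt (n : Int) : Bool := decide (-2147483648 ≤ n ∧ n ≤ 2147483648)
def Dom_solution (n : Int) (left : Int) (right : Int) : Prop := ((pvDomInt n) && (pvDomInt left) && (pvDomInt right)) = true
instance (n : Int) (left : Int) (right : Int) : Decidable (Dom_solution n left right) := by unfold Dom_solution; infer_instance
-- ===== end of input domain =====

-- B replaces A's nested row/column loops with a four-way positional branch by one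
-- map over the flat index range [left, right], computing max(k % n + 1, k // n + 1).


-- ===== PORT A =====
def solution (n : Int) (left : Int) (right : Int) : List Int :=
  let l := PySem.Int.floordiv left n
  let ld := PySem.Int.mod left n
  let r := PySem.Int.floordiv right n
  let rd := PySem.Int.mod right n
  (PySem.List.pyRange (l+1) (r+2) 1).foldl (fun answer i =>
    if l = r then
      (PySem.List.pyRange ld (rd+1) 1).foldl (fun answer j => answer ++ [max (j+1) i]) answer
    else if i = l+1 then
      (PySem.List.pyRange ld n 1).foldl (fun answer j => answer ++ [max (j+1) i]) answer
    else if i = r+1 then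
      (PySem.List.pyRange 0 (rd+1) 1).foldl (fun answer j => answer ++ [max (j+1) i]) answer
    else
      (PySem.List.pyRange 0 n 1).foldl (fun answer j => answer ++ [max (j+1) i]) answer) []

-- ===== PORT B =====
def solution_alt (n : Int) (left : Int) (right : Int) : List Int :=
  (PySem.List.pyRange left (right+1) 1).map
    (fun k => max (PySem.Int.mod k n + 1) (PySem.Int.floordiv k n + 1))

-- ===== PRECONDITION & SPEC =====
-- Pre_ excludes n = 0 (A raises ZeroDivisionError) and n < 0, where A still returns a value
-- but one that is an accident of Python's floor division outside the natural domain of a grid size.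
def Pre_solution (n : Int) (left : Int) (right : Int) : Prop := 1 ≤ n
instance (n : Int) (left : Int) (right : Int) : Decidable (Pre_solution n left right) := by unfold Pre_solution; infer_instance
def pvWitness_solution : Int × Int × Int := (3, 2, 5)
def Spec_solution (n : Int) (left : Int) (right : Int) (out : List Int) : Prop := out = solution_alt n left right
instance (n : Int) (left : Int) (right : Int) (out : List Int) : Decidable (Spec_solution n left right out) := by unfold Spec_solution; infer_instance

-- ===== CLAIM (what is proved, stated in full; the proofs are below) =====
def Claim_equal_solution : Prop := ∀ (n : Int) (left : Int) (right : Int), Dom_solution n left right → Pre_solution n left right → Spec_solution n left right (solution n left right)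

-- ===== LEMMAS AND PROOFS =====

-- A with its local lets inlined (definitional).
theorem solution_eq (n left right : Int) : solution n left right =
    (PySem.List.pyRange (PySem.Int.floordiv left n + 1) (PySem.Int.floordiv right n + 2) 1).foldl
      (fun answer i =>
        if PySem.Int.floordiv left n = PySem.Int.floordiv right n then
          (PySem.List.pyRange (PySem.Int.mod left n) (PySem.Int.mod right n + 1) 1).foldl
            (fun answer j => answer ++ [max (j+1) i]) answer
        else if i = PySem.Int.floordiv left n + 1 then
          (PySem.List.pyRange (PySem.Int.mod left n) n 1).foldl
            (fun answer j => answer ++ [max (j+1) i]) answer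
        else if i = PySem.Int.floordiv right n + 1 then
          (PySem.List.pyRange 0 (PySem.Int.mod right n + 1) 1).foldl
            (fun answer j => answer ++ [max (j+1) i]) answer
        else
          (PySem.List.pyRange 0 n 1).foldl
            (fun answer j => answer ++ [max (j+1) i]) answer) [] := rfl

-- One row of B's flat map equals the corresponding column map of A's inner loop.
theorem row_map (n i a b : Int) (hn : 0 < n) (ha : 0 ≤ a) (hb : b ≤ n) :
    (PySem.List.pyRange (i*n+a) (i*n+b) 1).map
      (fun k => max (PySem.Int.mod k n + 1) (PySem.Int.floordiv k n + 1))
    = (PySem.List.pyRange a b 1).map (fun j => max (j+1) (i+1)) := by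
  rw [PySem.List.pyRange_one, PySem.List.pyRange_one]
  have h1 : i*n+b - (i*n+a) = b - a := by ring
  rw [h1, List.map_map, List.map_map]
  apply List.map_congr_left
  intro k hk
  simp only [List.mem_range] at hk
  have hj1 : (k : Int) < b - a := by omega
  have hd : PySem.Int.floordiv (i*n+a+k) n = i := by
    rw [PySem.Int.floordiv_eq_iff_of_pos hn]
    have h2 : (i+1)*n = i*n + n := by ring
    omega
  have hm : PySem.Int.mod (i*n+a+k) n = a + k := by
    have h3 := PySem.Int.floordiv_mul_add_mod (i*n+a+k) n
    rw [hd] at h3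
    omega
  simp only [Function.comp, hd, hm]

-- A run of full rows of A's middle branch equals B's flat map over the matching flat range.
theorem full_rows (n : Int) (hn : 0 < n) (a : Int) (m : Nat) :
    (PySem.List.pyRange a (a+m) 1).flatMap
      (fun i => (PySem.List.pyRange 0 n 1).map (fun j => max (j+1) i))
    = (PySem.List.pyRange ((a-1)*n) ((a-1+m)*n) 1).map
        (fun k => max (PySem.Int.mod k n + 1) (PySem.Int.floordiv k n + 1)) := by
  induction m with
  | zero =>
      simp [PySem.List.pyRange_one_eq_nil]
  | succ m ih =>
      have h1 : a + ((m+1 : Nat) : Int) = (a + m) + 1 := by push_cast; ring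
      rw [h1, PySem.List.pyRange_one_succ_right (by omega : a ≤ a + (m:Int)),
          List.flatMap_append, ih]
      simp only [List.flatMap_cons, List.flatMap_nil, List.append_nil]
      have h2 : (PySem.List.pyRange 0 n 1).map (fun j => max (j+1) (a + (m:Int)))
          = (PySem.List.pyRange ((a+m-1)*n+0) ((a+m-1)*n+n) 1).map
              (fun k => max (PySem.Int.mod k n + 1) (PySem.Int.floordiv k n + 1)) := by
        rw [row_map n (a+m-1) 0 n hn le_rfl le_rfl]
        have : a + (m:Int) - 1 + 1 = a + m := by ring
        rw [this]
      have h3 : (a+(m:Int)-1)*n+0 = (a-1+m)*n := by ring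
      have h4 : (a+(m:Int)-1)*n+n = (a-1+((m+1:Nat):Int))*n := by push_cast; ring
      rw [h2, ← List.map_append, h3,
        ← PySem.List.pyRange_one_append ((a-1)*n) ((a-1+(m:Int))*n) ((a+(m:Int)-1)*n+n)
          (by nlinarith [Int.natCast_nonneg m]) (by nlinarith), h4]

-- ===== VERDICT (by name: the statement is the Claim_ definition above) =====
theorem solution_spec : Claim_equal_solution := by
  intro n left right _ hn
  unfold Pre_solution at hn
  have hn0 : 0 < n := hn
  unfold Spec_solution solution_alt
  rw [solution_eq]
  set l := PySem.Int.floordiv left n with hl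
  set ld := PySem.Int.mod left n with hld
  set r := PySem.Int.floordiv right n with hr
  set rd := PySem.Int.mod right n with hrd
  have hL : l * n + ld = left := PySem.Int.floordiv_mul_add_mod left n
  have hR : r * n + rd = right := PySem.Int.floordiv_mul_add_mod right n
  have hld0 : 0 ≤ ld ∧ ld < n := by
    rw [hld, PySem.Int.mod_eq_emod_of_pos hn0]
    exact ⟨Int.emod_nonneg _ (by omega), Int.emod_lt_of_pos _ hn0⟩
  have hrd0 : 0 ≤ rd ∧ rd < n := by
    rw [hrd, PySem.Int.mod_eq_emod_of_pos hn0]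
    exact ⟨Int.emod_nonneg _ (by omega), Int.emod_lt_of_pos _ hn0⟩
  clear_value l ld r rd
  -- turn A's outer loop into a flatMap of per-row lists
  have hbody : (PySem.List.pyRange (l+1) (r+2) 1).foldl
      (fun answer i =>
        if l = r then (PySem.List.pyRange ld (rd+1) 1).foldl (fun answer j => answer ++ [max (j+1) i]) answer
        else if i = l+1 then (PySem.List.pyRange ld n 1).foldl (fun answer j => answer ++ [max (j+1) i]) answer
        else if i = r+1 then (PySem.List.pyRange 0 (rd+1) 1).foldl (fun answer j => answer ++ [max (j+1) i]) answer
        else (PySem.List.pyRange 0 n 1).foldl (fun answer j => answer ++ [max (j+1) i]) answer) []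
      = (PySem.List.pyRange (l+1) (r+2) 1).foldl (fun answer i => answer ++
        (if l = r then (PySem.List.pyRange ld (rd+1) 1).map (fun j => max (j+1) i)
         else if i = l+1 then (PySem.List.pyRange ld n 1).map (fun j => max (j+1) i)
         else if i = r+1 then (PySem.List.pyRange 0 (rd+1) 1).map (fun j => max (j+1) i)
         else (PySem.List.pyRange 0 n 1).map (fun j => max (j+1) i))) [] := by
    apply PySem.List.foldl_congr_mem
    intro acc i _
    split_ifs <;> rw [PySem.List.foldl_append_singleton_eq_map]
  rw [hbody, PySem.List.foldl_append_eq_flatMap, List.nil_append]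
  by_cases hlr : l = r
  · -- single row
    subst hlr
    have h5 : l + 2 = (l+1) + 1 := by ring
    rw [h5, PySem.List.pyRange_one_singleton]
    simp only [List.flatMap_cons, List.flatMap_nil, List.append_nil]
    have h6 := row_map n l ld (rd+1) hn0 hld0.1 (by omega)
    rw [hL] at h6
    have h7 : l*n + (rd+1) = right + 1 := by omega
    rw [h7] at h6
    exact h6.symm
  · rcases lt_or_gt_of_ne hlr with hlt | hgt
    · -- l < r : first partial row, full middle rows, last partial row
      have hsplit : PySem.List.pyRange (l+1) (r+2) 1
          = [l+1] ++ PySem.List.pyRange (l+1+1) (r+1) 1 ++ [r+1] := by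
        rw [PySem.List.pyRange_one_cons (by omega : l+1 < r+2)]
        have h8 : r + 2 = (r+1) + 1 := by ring
        rw [h8, PySem.List.pyRange_one_succ_right (by omega : l+1+1 ≤ r+1)]
        simp
      rw [hsplit, List.flatMap_append, List.flatMap_append]
      simp only [List.flatMap_cons, List.flatMap_nil, List.append_nil]
      have hne1 : ¬(l+1 = r+1) := by omega
      have hne2 : ¬(r+1 = l+1) := by omega
      simp only [if_neg hlr, if_true, if_neg hne1, if_neg hne2]
      -- middle rows are all the full branch
      have hmid : (PySem.List.pyRange (l+1+1) (r+1) 1).flatMap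
          (fun i => if i = l+1 then (PySem.List.pyRange ld n 1).map (fun j => max (j+1) i)
            else if i = r+1 then (PySem.List.pyRange 0 (rd+1) 1).map (fun j => max (j+1) i)
            else (PySem.List.pyRange 0 n 1).map (fun j => max (j+1) i))
          = (PySem.List.pyRange (l+1+1) (r+1) 1).flatMap
          (fun i => (PySem.List.pyRange 0 n 1).map (fun j => max (j+1) i)) := by
        unfold List.flatMap
        congr 1
        apply List.map_congr_left
        intro i hi
        rw [PySem.List.mem_pyRange_one] at hi
        rw [if_neg (by omega : ¬(i = l+1)), if_neg (by omega : ¬(i = r+1))]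
      rw [hmid]
      have hfull := full_rows n hn0 (l+1+1) (r-1-l).toNat
      rw [show l+1+1+((r-1-l).toNat:Int) = r+1 from by omega,
          show (l+1+1-1)*n = l*n+n from by ring,
          show (l+1+1-1+((r-1-l).toNat:Int))*n = r*n from by
            rw [show ((r-1-l).toNat:Int) = r-1-l from by omega]; ring] at hfull
      rw [hfull]
      -- first row
      have hfst := row_map n l ld n hn0 hld0.1 le_rfl
      rw [hL] at hfst
      -- last row
      have hlst := row_map n r 0 (rd+1) hn0 le_rfl (by omega)
      have h9 : r*n + 0 = r*n := by ring
      have h10 : r*n + (rd+1) = right + 1 := by omega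
      rw [h9, h10] at hlst
      rw [← hfst, ← hlst, ← List.map_append, ← List.map_append]
      congr 1
      rw [← PySem.List.pyRange_one_append left (l*n+n) (r*n) (by omega)
          (by nlinarith),
        ← PySem.List.pyRange_one_append left (r*n) (right+1) (by nlinarith) (by omega)]
    · -- l > r : both sides empty
      have hgtLR : right < left := by
        have : (r+1)*n ≤ l*n := by nlinarith
        have h13 : (r+1)*n = r*n+n := by ring
        omega
      rw [PySem.List.pyRange_one_eq_nil (by omega : r+2 ≤ l+1),
          PySem.List.pyRange_one_eq_nil (by omega : right+1 ≤ left)]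
      simp
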